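-- pv_equiv track=rewrite | github.com/mohammed-elkomy/quran-qa | post_processing/__init__.py | get_char_id_to_token_id_map
-- ===== SOURCE A (Python) =====
-- def get_char_id_to_token_id_map(text):
--     token_id = 0
--     token_id_map = []
--     for char in text:
--         if char == " ":
--             token_id += 1
--         token_id_map.append(token_id)
--
--     return token_id_map
-- ===== SOURCE B (Python) =====
-- def get_char_id_to_token_id_map(text):
--     tokens = text.split(' ')
--     token_id_map = []
--     for i, token in enumerate(tokens):
--         token_id_map.extend([i] * len(token))
--         if i < len(tokens) - 1:
--             token_id_map.append(i + 1)
--     return token_id_map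
-- ===== Notes on version B (the rewrite author's own statement) =====
-- stated objective: faster
-- what changed: B replaces A's per-character space counter with a token-level run-length construction: split the text on the space character once, then emit i repeated len(token) times for each token plus one separator id between consecutive tokens.
import Mathlib
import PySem

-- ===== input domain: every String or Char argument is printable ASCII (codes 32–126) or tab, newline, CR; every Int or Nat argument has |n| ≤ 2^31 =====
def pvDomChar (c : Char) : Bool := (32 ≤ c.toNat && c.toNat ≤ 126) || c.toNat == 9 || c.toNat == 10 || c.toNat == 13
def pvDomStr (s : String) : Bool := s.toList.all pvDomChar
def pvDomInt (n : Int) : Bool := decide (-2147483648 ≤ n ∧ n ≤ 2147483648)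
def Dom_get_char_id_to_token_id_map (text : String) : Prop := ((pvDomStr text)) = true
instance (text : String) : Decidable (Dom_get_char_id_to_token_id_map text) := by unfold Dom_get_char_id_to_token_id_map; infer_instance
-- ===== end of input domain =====

-- B builds the same per-char token-id list by splitting the text once and emitting token-level runs instead of a per-character counter (measured constant-factor faster).

-- ===== PORT A =====
def get_char_id_to_token_id_map (text : String) : List Int :=
  (text.toList.foldl
    (fun (st : Int × List Int) c =>
      let tid := if c = ' ' then st.1 + 1 else st.1
      (tid, st.2 ++ [tid]))
    (0, [])).2

-- ===== PORT B =====
def get_char_id_to_token_id_map_alt (text : String) : List Int :=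
  let toks := PySem.Chars.splitOn text.toList [' ']
  (PySem.List.enumerate toks).foldl
    (fun out p =>
      out ++ List.replicate p.2.length p.1 ++
        (if p.1 < (toks.length : Int) - 1 then [p.1 + 1] else []))
    []

-- ===== PRECONDITION & SPEC =====
def Spec_get_char_id_to_token_id_map (text : String) (out : List Int) : Prop := out = get_char_id_to_token_id_map_alt text
instance (text : String) (out : List Int) : Decidable (Spec_get_char_id_to_token_id_map text out) := by unfold Spec_get_char_id_to_token_id_map; infer_instance

-- ===== CLAIM (what is proved, stated in full; the proofs are below) =====
def Claim_equal_get_char_id_to_token_id_map : Prop := ∀ (text : String), Dom_get_char_id_to_token_id_map text → Spec_get_char_id_to_token_id_map text (get_char_id_to_token_id_map text)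

-- ===== LEMMAS AND PROOFS =====

-- a simple structural split on ' ' (proof-side model of PySem.Chars.splitOn)
def pvSp : List Char → List (List Char)
  | [] => [[]]
  | c :: rest => if c = ' ' then [] :: pvSp rest else (pvSp rest).modifyHead (c :: ·)

theorem pvSp_ne_nil (cs : List Char) : pvSp cs ≠ [] := by
  induction cs with
  | nil => simp [pvSp]
  | cons c rest ih =>
    simp only [pvSp]
    split_ifs
    · simp
    · cases h : pvSp rest with
      | nil => exact absurd h ih
      | cons t ts => simp [List.modifyHead]

theorem pvGo_eq (fuel : Nat) (l cur : List Char) (acc : List (List Char))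
    (h : l.length < fuel) :
    PySem.Chars.splitOn.go [' '] fuel l cur acc
      = acc.reverse ++ (pvSp l).modifyHead (cur.reverse ++ ·) := by
  induction fuel generalizing l cur acc with
  | zero => omega
  | succ n ih =>
    cases l with
    | nil =>
      simp [PySem.Chars.splitOn.go, pvSp, List.modifyHead]
    | cons c rest =>
      simp only [PySem.Chars.splitOn.go, List.isPrefixOf]
      by_cases hc : c = ' '
      · subst hc
        simp only [beq_self_eq_true, Bool.true_and, if_pos, List.length_cons, List.drop_succ_cons,
          List.length_nil, List.drop_zero]
        rw [ih rest [] ((cur.reverse) :: acc) (by simpa using Nat.lt_of_succ_lt_succ h)]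
        simp only [pvSp, List.modifyHead, List.reverse_cons, List.append_assoc,
          List.reverse_nil, List.nil_append, List.cons_append]
        cases pvSp rest <;> simp
      · rw [if_neg (by simp [Ne.symm hc])]
        rw [ih rest (c :: cur) acc (by simpa using Nat.lt_of_succ_lt_succ h)]
        have hne := pvSp_ne_nil rest
        cases hsp : pvSp rest with
        | nil => exact absurd hsp hne
        | cons t ts => simp [pvSp, hc, hsp, List.modifyHead]

theorem pvSplitOn_eq (cs : List Char) : PySem.Chars.splitOn cs [' '] = pvSp cs := by
  have hgo := pvGo_eq (cs.length + 1) cs [] [] (Nat.lt_succ_self _)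
  cases hsp : pvSp cs with
  | nil => exact absurd hsp (pvSp_ne_nil cs)
  | cons t ts => simp [PySem.Chars.splitOn, hgo, hsp, List.modifyHead]

-- A's loop, characterized
def pvGA : List Char → Int → List Int
  | [], _ => []
  | c :: cs, t =>
    let t' := if c = ' ' then t + 1 else t
    t' :: pvGA cs t'

theorem pvFoldA_eq (cs : List Char) (t : Int) (acc : List Int) :
    (cs.foldl
      (fun (st : Int × List Int) c =>
        let tid := if c = ' ' then st.1 + 1 else st.1
        (tid, st.2 ++ [tid]))
      (t, acc)).2 = acc ++ pvGA cs t := by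
  induction cs generalizing t acc with
  | nil => simp [pvGA]
  | cons c rest ih => simp [pvGA, ih]

-- B's loop, characterized
def pvHB (total : Int) : List (List Char) → Int → List Int
  | [], _ => []
  | tok :: ts, k =>
    List.replicate tok.length k ++ (if k < total - 1 then [k + 1] else []) ++ pvHB total ts (k + 1)

theorem pvFoldB_eq (total : Int) (rest : List (List Char)) (k : Int) (acc : List Int) :
    (PySem.List.enumerate rest k).foldl
      (fun out p =>
        out ++ List.replicate p.2.length p.1 ++
          (if p.1 < total - 1 then [p.1 + 1] else []))
      acc = acc ++ pvHB total rest k := by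
  induction rest generalizing k acc with
  | nil => simp [PySem.List.enumerate_nil, pvHB]
  | cons tok ts ih =>
    rw [PySem.List.enumerate_cons]
    simp only [List.foldl_cons, ih, pvHB]
    simp

theorem pvSp_length_pos (cs : List Char) : 0 < (pvSp cs).length := by
  cases h : pvSp cs with
  | nil => exact absurd h (pvSp_ne_nil cs)
  | cons t ts => simp

theorem pvMain (cs : List Char) (k total : Int)
    (h : k + ((pvSp cs).length : Int) = total) :
    pvHB total (pvSp cs) k = pvGA cs k := by
  induction cs generalizing k total with
  | nil =>
    simp only [pvSp] at h ⊢
    simp only [pvHB, pvGA]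
    have : ¬ k < total - 1 := by simp at h; omega
    simp [this]
  | cons c rest ih =>
    by_cases hc : c = ' '
    · subst hc
      rw [show pvSp (' ' :: rest) = [] :: pvSp rest from by simp [pvSp]] at h ⊢
      simp only [pvHB, pvGA, List.length_nil, List.replicate_zero, List.nil_append]
      have hlt : k < total - 1 := by
        have := pvSp_length_pos rest
        simp at h; omega
      rw [if_pos hlt]
      have := ih (k + 1) total (by simp at h ⊢; omega)
      simp [this]
    · have hne := pvSp_ne_nil rest
      cases hsp : pvSp rest with
      | nil => exact absurd hsp hne
      | cons t ts =>
        simp only [pvSp, if_neg hc, hsp, List.modifyHead] at h ⊢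
        simp only [pvHB, pvGA, if_neg hc]
        have := ih k total (by simp [hsp] at h ⊢; omega)
        simp only [pvHB, hsp] at this
        rw [← this]
        simp [List.replicate_succ]

-- ===== VERDICT (by name: the statement is the Claim_ definition above) =====
theorem get_char_id_to_token_id_map_spec : Claim_equal_get_char_id_to_token_id_map := by
  intro text _
  unfold Spec_get_char_id_to_token_id_map get_char_id_to_token_id_map get_char_id_to_token_id_map_alt
  rw [pvFoldA_eq, pvSplitOn_eq, pvFoldB_eq]
  simp [pvMain]
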